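-- pv_equiv track=rewrite | github.com/ThreeFish-AI/negentropy | apps/negentropy/tests/eval_tests/memory/eval_runner.py | find_gold_indices
-- ===== SOURCE A (Python) =====
-- def find_gold_indices(memories: list[str], expected: list[str]) -> set[int]:
--     """以 expected substrings 在哪条 memory 出现作为 gold 标签。"""
--     gold: set[int] = set()
--     for i, m in enumerate(memories):
--         m_lower = m.lower()
--         for sub in expected:
--             if sub and sub in m_lower:
--                 gold.add(i)
--                 break
--     return gold
-- ===== SOURCE B (Python) =====
-- def _has_sub(text, pats, maxlen):
--     # enumerate the substrings of text no longer than the longest pattern and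
--     # look each one up in the pattern set
--     n = len(text)
--     for j in range(n):
--         top = min(n, j + maxlen)
--         for k in range(j + 1, top + 1):
--             if text[j:k] in pats:
--                 return True
--     return False
--
--
-- def find_gold_indices(memories: list[str], expected: list[str]) -> set[int]:
--     pats = {p for p in expected if p}
--     maxlen = max(map(len, pats), default=0)
--     gold = set()
--     for i, m in enumerate(memories):
--         if _has_sub(m.lower(), pats, maxlen):
--             gold.add(i)
--     return gold
-- ===== Notes on version B (the rewrite author's own statement) =====
-- stated objective: faster
-- what changed: B builds a hash set of the nonempty expected patterns once and, per memory, enumerates the substrings of the lowered memory no longer than the longest pattern and looks each up in the set, so the inner scan over the pattern list disappears; A instead runs a 'sub in m_lower' substring search for every pattern of every memory.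
import Mathlib
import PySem

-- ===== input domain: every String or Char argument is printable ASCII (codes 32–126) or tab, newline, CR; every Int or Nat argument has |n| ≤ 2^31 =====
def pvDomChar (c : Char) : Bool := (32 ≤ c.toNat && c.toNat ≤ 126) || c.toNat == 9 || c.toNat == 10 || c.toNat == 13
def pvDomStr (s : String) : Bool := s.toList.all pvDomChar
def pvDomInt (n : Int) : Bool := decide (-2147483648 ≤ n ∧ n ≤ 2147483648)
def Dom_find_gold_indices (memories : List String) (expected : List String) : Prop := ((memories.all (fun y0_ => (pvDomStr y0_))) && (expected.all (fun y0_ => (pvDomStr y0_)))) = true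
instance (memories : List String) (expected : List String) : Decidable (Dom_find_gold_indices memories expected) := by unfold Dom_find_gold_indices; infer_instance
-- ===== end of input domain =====

-- B hashes the nonempty patterns into a set and, per lowered memory, looks up each
-- bounded-length substring in that set, removing A's per-pattern substring searches.

-- ===== PORT A =====
-- inner 'for sub in expected: … break' loop of A
def pvGoldLoop (gold : PySem.Set Int) (i : Int) (ml : String) : List String → PySem.Set Int
  | [] => gold
  | sub :: rest =>
    if sub ≠ "" ∧ PySem.Str.isIn sub ml = true then PySem.Set.add gold i
    else pvGoldLoop gold i ml rest

def find_gold_indices (memories : List String) (expected : List String) : List Int :=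
  (PySem.List.enumerate memories).foldl
    (fun gold p => pvGoldLoop gold p.1 (PySem.Str.lower p.2) expected)
    PySem.Set.empty

-- ===== PORT B =====
-- _has_sub: the outer 'for j in range(n)' becomes structural recursion over the suffixes
-- of text; the inner 'for k in range(j+1, top+1)' becomes recursion on the remaining
-- iteration count, with text[j:k] = (text.drop j).take (k-j).
def pvInnerLoop (pats : PySem.Set String) (tail : List Char) : Nat → Nat → Bool
  | _, 0 => false
  | d, rem + 1 =>
    PySem.Set.contains pats (String.ofList (tail.take d)) || pvInnerLoop pats tail (d + 1) rem

def pvHasSub (pats : PySem.Set String) (maxlen : Nat) : List Char → Bool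
  | [] => false
  | c :: rest =>
    pvInnerLoop pats (c :: rest) 1 (min (c :: rest).length maxlen)
      || pvHasSub pats maxlen rest

def find_gold_indices_alt (memories : List String) (expected : List String) : List Int :=
  let pats : PySem.Set String := PySem.Set.ofList (expected.filter (fun p => p != ""))
  -- max(map(len, pats), default=0): a fold of max over the set's elements (order-independent;
  -- len(p) = p.toList.length, exact)
  let maxlen : Nat := pats.foldl (fun acc p => max acc p.toList.length) 0
  (PySem.List.enumerate memories).foldl
    (fun gold p =>
      if pvHasSub pats maxlen (PySem.Str.lower p.2).toList then PySem.Set.add gold p.1 else gold)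
    PySem.Set.empty

-- ===== PRECONDITION & SPEC =====
def Spec_find_gold_indices (memories : List String) (expected : List String) (out : List Int) : Prop := out = find_gold_indices_alt memories expected
instance (memories : List String) (expected : List String) (out : List Int) : Decidable (Spec_find_gold_indices memories expected out) := by unfold Spec_find_gold_indices; infer_instance

-- ===== CLAIM (what is proved, stated in full; the proofs are below) =====
def Claim_equal_find_gold_indices : Prop := ∀ (memories : List String) (expected : List String), Dom_find_gold_indices memories expected → Spec_find_gold_indices memories expected (find_gold_indices memories expected)

-- ===== LEMMAS AND PROOFS =====

theorem pvInnerLoop_iff (pats : PySem.Set String) (tail : List Char) (d rem : Nat) :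
    pvInnerLoop pats tail d rem = true ↔
      ∃ e, d ≤ e ∧ e < d + rem ∧ PySem.Set.contains pats (String.ofList (tail.take e)) = true := by
  induction rem generalizing d with
  | zero =>
    simp only [pvInnerLoop, Bool.false_eq_true, false_iff]
    rintro ⟨e, h1, h2, _⟩; omega
  | succ rem ih =>
    simp only [pvInnerLoop, Bool.or_eq_true, ih]
    constructor
    · rintro (h | ⟨e, h1, h2, h3⟩)
      · exact ⟨d, le_rfl, by omega, h⟩
      · exact ⟨e, by omega, by omega, h3⟩
    · rintro ⟨e, h1, h2, h3⟩
      rcases eq_or_lt_of_le h1 with rfl | hlt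
      · exact Or.inl h3
      · exact Or.inr ⟨e, by omega, by omega, h3⟩

-- the substring enumeration finds exactly the patterns occurring as an infix, provided
-- every pattern is nonempty and no longer than maxlen
theorem pvHasSub_iff (pats : PySem.Set String) (maxlen : Nat)
    (hne : ∀ p ∈ pats, p.toList ≠ [])
    (hlen : ∀ p ∈ pats, p.toList.length ≤ maxlen)
    (l : List Char) :
    pvHasSub pats maxlen l = true ↔ ∃ p ∈ pats, p.toList <:+: l := by
  induction l with
  | nil =>
    simp only [pvHasSub, Bool.false_eq_true, false_iff]
    rintro ⟨p, hp, h⟩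
    exact hne p hp (List.eq_nil_of_infix_nil h)
  | cons c rest ih =>
    simp only [pvHasSub, Bool.or_eq_true, ih, pvInnerLoop_iff, List.infix_cons_iff]
    constructor
    · rintro (⟨e, h1, h2, h3⟩ | ⟨p, hp, h⟩)
      · refine ⟨String.ofList ((c :: rest).take e),
          (PySem.Set.contains_iff _ _).mp h3, Or.inl ?_⟩
        rw [String.toList_ofList]
        exact List.take_prefix e (c :: rest)
      · exact ⟨p, hp, Or.inr h⟩
    · rintro ⟨p, hp, h | h⟩
      · refine Or.inl ⟨p.toList.length, ?_, ?_, ?_⟩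
        · have := hne p hp
          cases e : p.toList with
          | nil => exact absurd e this
          | cons _ _ => simp
        · have h1 := hlen p hp
          have h2 := h.length_le
          simp only [List.length_cons] at h2 ⊢
          omega
        · have ht : List.take p.toList.length (c :: rest) = p.toList :=
            (List.prefix_iff_eq_take.mp h).symm
          rw [ht, String.ofList_toList]
          exact (PySem.Set.contains_iff _ _).mpr hp
      · exact Or.inr ⟨p, hp, h⟩


theorem pvGoldLoop_eq (gold : PySem.Set Int) (i : Int) (ml : String) (expected : List String) :
    pvGoldLoop gold i ml expected =
      if ∃ sub ∈ expected, sub ≠ "" ∧ PySem.Str.isIn sub ml = true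
      then PySem.Set.add gold i else gold := by
  induction expected with
  | nil => simp [pvGoldLoop]
  | cons sub rest ih =>
    simp only [pvGoldLoop, ih]
    by_cases h : sub ≠ "" ∧ PySem.Str.isIn sub ml = true
    · rw [if_pos h, if_pos]
      exact ⟨sub, List.mem_cons_self, h⟩
    · rw [if_neg h]
      by_cases h2 : ∃ s ∈ rest, s ≠ "" ∧ PySem.Str.isIn s ml = true
      · rw [if_pos h2, if_pos]
        obtain ⟨s, hs, hh⟩ := h2
        exact ⟨s, List.mem_cons_of_mem _ hs, hh⟩
      · rw [if_neg h2, if_neg]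
        rintro ⟨s, hs, hh⟩
        rcases List.mem_cons.mp hs with rfl | hs'
        · exact h hh
        · exact h2 ⟨s, hs', hh⟩

theorem pv_acc_le_foldl_max (l : List String) (acc : Nat) :
    acc ≤ l.foldl (fun a q => max a q.toList.length) acc := by
  induction l generalizing acc with
  | nil => exact le_rfl
  | cons q rest ih =>
    simp only [List.foldl_cons]
    exact le_trans (le_max_left _ _) (ih _)

theorem pv_mem_le_foldl_max (l : List String) :
    ∀ (acc : Nat) (p : String), p ∈ l →
      p.toList.length ≤ l.foldl (fun a q => max a q.toList.length) acc := by
  induction l with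
  | nil => intro _ _ hp; cases hp
  | cons q rest ih =>
    intro acc p hp
    simp only [List.foldl_cons]
    rcases List.mem_cons.mp hp with rfl | hp'
    · exact le_trans (le_max_right _ _) (pv_acc_le_foldl_max rest _)
    · exact ih _ p hp'

theorem pv_filter_ne_nil (expected : List String) :
    ∀ p ∈ expected.filter (fun p => p != ""), p.toList ≠ [] := by
  intro p hp h
  have h2 := (List.mem_filter.mp hp).2
  rw [bne_iff_ne] at h2
  exact h2 (by simpa using congrArg String.ofList h)

theorem pvStep_eq (expected : List String) (gold : PySem.Set Int) (i : Int) (m : String) :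
    pvGoldLoop gold i (PySem.Str.lower m) expected =
      (if pvHasSub (PySem.Set.ofList (expected.filter (fun p => p != "")))
            ((PySem.Set.ofList (expected.filter (fun p => p != ""))).foldl
              (fun acc p => max acc p.toList.length) 0)
            (PySem.Str.lower m).toList
       then PySem.Set.add gold i else gold) := by
  rw [pvGoldLoop_eq]
  congr 1
  simp only [eq_iff_iff]
  rw [pvHasSub_iff]
  · constructor
    · rintro ⟨sub, hs, hne, hin⟩
      refine ⟨sub, ?_, (PySem.Str.isIn_iff_infix _ _).mp hin⟩
      rw [PySem.Set.mem_ofList]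
      exact List.mem_filter.mpr ⟨hs, by simpa using hne⟩
    · rintro ⟨p, hp, hinf⟩
      rw [PySem.Set.mem_ofList] at hp
      obtain ⟨hmem, hne⟩ := List.mem_filter.mp hp
      exact ⟨p, hmem, by simpa using hne, (PySem.Str.isIn_iff_infix _ _).mpr hinf⟩
  · intro p hp
    rw [PySem.Set.mem_ofList] at hp
    exact pv_filter_ne_nil expected p hp
  · intro p hp
    exact pv_mem_le_foldl_max _ 0 p hp

-- ===== VERDICT (by name: the statement is the Claim_ definition above) =====
theorem find_gold_indices_spec : Claim_equal_find_gold_indices := by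
  intro memories expected _
  unfold Spec_find_gold_indices find_gold_indices find_gold_indices_alt
  simp only []
  congr 1
  funext gold p
  exact pvStep_eq expected gold p.1 p.2
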